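-- pv_equiv track=rewrite | github.com/ratbro2211/nhej-repair-genome-analysis | scripts/06_phylogeny/01_phylo_heatmap_ku_presence.py | parse_taxon
-- ===== SOURCE A (Python) =====
-- def parse_taxon(tax_str: str):
--     """Return (phylum, class) extracted from GTDB taxonomy string."""
--     s = str(tax_str)
--     phy = "Unknown"
--     cls = "Unknown"
--     for chunk in s.split(";"):
--         chunk = chunk.strip()
--         if chunk.startswith("p__"):
--             v = chunk[3:].strip()
--             phy = v if v else "Unknown"
--         elif chunk.startswith("c__"):
--             v = chunk[3:].strip()
--             cls = v if v else "Unknown"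
--     return phy, cls
-- ===== SOURCE B (Python) =====
-- def parse_taxon(tax_str: str):
--     """Return (phylum, class) extracted from GTDB taxonomy string."""
--     chunks = [c.strip() for c in str(tax_str).split(";")]
--
--     def last_value(prefix):
--         v = next((c[3:].strip() for c in reversed(chunks) if c.startswith(prefix)), "")
--         return v if v else "Unknown"
--
--     return last_value("p__"), last_value("c__")
-- ===== Notes on version B (the rewrite author's own statement) =====
-- stated objective: alternative
-- what changed: B scans the stripped chunks back-to-front and takes the FIRST match per prefix (two staged reverse searches with early stop at the first hit), instead of A's forward branch-and-assign loop over two scalar accumulators; last-wins forward equals first-found backward.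
import Mathlib
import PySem

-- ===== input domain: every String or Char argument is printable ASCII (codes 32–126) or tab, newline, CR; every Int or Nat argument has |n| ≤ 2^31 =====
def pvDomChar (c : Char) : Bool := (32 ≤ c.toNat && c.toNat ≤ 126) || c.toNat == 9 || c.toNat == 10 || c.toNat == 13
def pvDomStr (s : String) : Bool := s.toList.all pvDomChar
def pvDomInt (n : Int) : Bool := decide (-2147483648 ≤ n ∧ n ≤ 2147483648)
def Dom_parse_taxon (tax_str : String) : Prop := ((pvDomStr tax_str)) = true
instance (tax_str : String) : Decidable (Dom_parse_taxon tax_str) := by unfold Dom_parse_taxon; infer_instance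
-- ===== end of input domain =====

-- B replaces A's forward branch-and-assign loop by two staged back-to-front
-- first-match searches over the stripped chunks (objective: alternative structure, same cost).

-- ===== PORT A =====
-- A's loop body: strip the chunk, branch on startswith, assign the normalized value.
def parse_taxon_stepA (st : String × String) (chunk : String) : String × String :=
  if PySem.Str.startswith (PySem.Str.strip chunk) "p__" then
    (let v := PySem.Str.strip (PySem.Str.slice (PySem.Str.strip chunk) (some 3) none)
     if v = "" then "Unknown" else v, st.2)
  else if PySem.Str.startswith (PySem.Str.strip chunk) "c__" then
    (st.1,
     let v := PySem.Str.strip (PySem.Str.slice (PySem.Str.strip chunk) (some 3) none)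
     if v = "" then "Unknown" else v)
  else st

def parse_taxon (tax_str : String) : String × String :=
  ((PySem.Str.split? tax_str ";").getD []).foldl parse_taxon_stepA ("Unknown", "Unknown")

-- ===== PORT B =====
-- B's last_value: first match on the reversed chunk list (default ""), then normalize.
def parse_taxon_lastval (chunks : List String) (pre : String) : String :=
  let v := match chunks.reverse.find? (fun c => PySem.Str.startswith c pre) with
    | some c => PySem.Str.strip (PySem.Str.slice c (some 3) none)
    | none => ""
  if v = "" then "Unknown" else v

def parse_taxon_alt (tax_str : String) : String × String :=
  let chunks := ((PySem.Str.split? tax_str ";").getD []).map PySem.Str.strip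
  (parse_taxon_lastval chunks "p__", parse_taxon_lastval chunks "c__")

-- ===== PRECONDITION & SPEC =====
def Spec_parse_taxon (tax_str : String) (out : String × String) : Prop := out = parse_taxon_alt tax_str
instance (tax_str : String) (out : String × String) : Decidable (Spec_parse_taxon tax_str out) := by unfold Spec_parse_taxon; infer_instance

-- ===== CLAIM (what is proved, stated in full; the proofs are below) =====
def Claim_equal_parse_taxon : Prop := ∀ (tax_str : String), Dom_parse_taxon tax_str → Spec_parse_taxon tax_str (parse_taxon tax_str)

-- ===== LEMMAS AND PROOFS =====

-- the last matching chunk's normalized value, or the default scalar when no chunk matches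
def pvLast (pre : String) (cs : List String) (dflt : String) : String :=
  match cs.reverse.find? (fun c => PySem.Str.startswith c pre) with
  | some ch =>
      let v := PySem.Str.strip (PySem.Str.slice ch (some 3) none)
      if v = "" then "Unknown" else v
  | none => dflt

-- a string cannot start with both "p__" and "c__"
theorem pv_not_both (s : String) (h : PySem.Str.startswith s "p__" = true) :
    PySem.Str.startswith s "c__" = false := by
  by_contra hc
  rw [Bool.not_eq_false, PySem.Str.startswith_eq, PySem.Chars.startswith_iff] at hc
  rw [PySem.Str.startswith_eq, PySem.Chars.startswith_iff] at h
  obtain ⟨t1, e1⟩ := h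
  obtain ⟨t2, e2⟩ := hc
  have := e1.trans e2.symm
  simp at this

-- prepending a chunk only changes the default pvLast falls back to
theorem pvLast_cons (pre y : String) (ys : List String) (dflt : String) :
    pvLast pre (y :: ys) dflt
      = pvLast pre ys
          (if PySem.Str.startswith y pre then
             (let v := PySem.Str.strip (PySem.Str.slice y (some 3) none)
              if v = "" then "Unknown" else v)
           else dflt) := by
  unfold pvLast
  rw [List.reverse_cons, List.find?_append]
  cases h : ys.reverse.find? (fun c => PySem.Str.startswith c pre) with
  | some v => rfl
  | none =>
      simp [List.find?]
      simp only [← PySem.Str.startswith_eq]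
      by_cases hy : PySem.Str.startswith y pre = true
      · simp only [hy]; simp
      · rw [Bool.not_eq_true] at hy; simp only [hy]; simp

-- the three cases of A's loop body, spelled out
theorem pv_stepA_p (st : String × String) (x : String)
    (h : PySem.Str.startswith (PySem.Str.strip x) "p__" = true) :
    parse_taxon_stepA st x
      = (let v := PySem.Str.strip (PySem.Str.slice (PySem.Str.strip x) (some 3) none)
         if v = "" then "Unknown" else v, st.2) := by
  unfold parse_taxon_stepA; rw [if_pos h]

theorem pv_stepA_c (st : String × String) (x : String)
    (h1 : ¬ PySem.Str.startswith (PySem.Str.strip x) "p__" = true)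
    (h2 : PySem.Str.startswith (PySem.Str.strip x) "c__" = true) :
    parse_taxon_stepA st x
      = (st.1, let v := PySem.Str.strip (PySem.Str.slice (PySem.Str.strip x) (some 3) none)
               if v = "" then "Unknown" else v) := by
  unfold parse_taxon_stepA; rw [if_neg h1, if_pos h2]

theorem pv_stepA_none (st : String × String) (x : String)
    (h1 : ¬ PySem.Str.startswith (PySem.Str.strip x) "p__" = true)
    (h2 : ¬ PySem.Str.startswith (PySem.Str.strip x) "c__" = true) :
    parse_taxon_stepA st x = st := by
  unfold parse_taxon_stepA; rw [if_neg h1, if_neg h2]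

-- loop invariant: A's fold state is, per key, the last matching chunk seen so far
theorem foldA_eq_pvLast (cs : List String) (p c : String) :
    cs.foldl parse_taxon_stepA (p, c)
      = (pvLast "p__" (cs.map PySem.Str.strip) p, pvLast "c__" (cs.map PySem.Str.strip) c) := by
  induction cs generalizing p c with
  | nil => rfl
  | cons x xs ih =>
    rw [List.foldl_cons, List.map_cons, pvLast_cons, pvLast_cons]
    by_cases h1 : PySem.Str.startswith (PySem.Str.strip x) "p__"
    · have h2 := pv_not_both _ h1
      rw [pv_stepA_p (p, c) x h1, ih]
      simp at h1 h2
      simp [h1, h2]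
    · by_cases h2 : PySem.Str.startswith (PySem.Str.strip x) "c__"
      · rw [pv_stepA_c (p, c) x h1 h2, ih]
        rw [Bool.not_eq_true] at h1
        simp at h1 h2
        simp [h1, h2]
      · rw [pv_stepA_none (p, c) x h1 h2, ih]
        rw [Bool.not_eq_true] at h1 h2
        simp at h1 h2
        simp [h1, h2]

-- B's last_value with default "" then normalize equals pvLast with default "Unknown"
theorem pv_lastval_eq_pvLast (chunks : List String) (pre : String) :
    parse_taxon_lastval chunks pre = pvLast pre chunks "Unknown" := by
  unfold parse_taxon_lastval pvLast
  cases h : chunks.reverse.find? (fun c => PySem.Str.startswith c pre) <;> simp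

-- ===== VERDICT (by name: the statement is the Claim_ definition above) =====
theorem parse_taxon_spec : Claim_equal_parse_taxon := by
  intro tax_str _
  unfold Spec_parse_taxon parse_taxon parse_taxon_alt
  rw [foldA_eq_pvLast]
  simp only [pv_lastval_eq_pvLast]
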